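-- pv_equiv track=rewrite | github.com/bwproud/SearchEngine | Positional.py | occurances
-- ===== SOURCE A (Python) =====
-- def occurances(lists, count):
--     p={}
--     for offset in range(len(lists)):
--         for idx in lists[offset]:
--             p[idx-offset] = p.get(idx-offset, 0) + 1
--
--     hits = 0
--     for idx in p:
--         if p[idx] == count:
--             hits += 1
--
--     return hits
-- ===== SOURCE B (Python) =====
-- def occurances(lists, count):
--     flat = sorted(idx - offset for offset, lst in enumerate(lists) for idx in lst)
--     hits = 0
--     i = 0
--     n = len(flat)
--     while i < n:
--         j = i + 1
--         while j < n and flat[j] == flat[i]: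
--             j += 1
--         if j - i == count:
--             hits += 1
--         i = j
--     return hits
-- ===== Notes on version B (the rewrite author's own statement) =====
-- stated objective: alternative
-- what changed: Replaced the dict-based counting aggregation (hash map of shifted index -> multiplicity, then a scan over the keys) by flattening all shifted indices into one list, sorting it, and counting maximal runs of equal values whose length is exactly `count` in a single scan.
import Mathlib
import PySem

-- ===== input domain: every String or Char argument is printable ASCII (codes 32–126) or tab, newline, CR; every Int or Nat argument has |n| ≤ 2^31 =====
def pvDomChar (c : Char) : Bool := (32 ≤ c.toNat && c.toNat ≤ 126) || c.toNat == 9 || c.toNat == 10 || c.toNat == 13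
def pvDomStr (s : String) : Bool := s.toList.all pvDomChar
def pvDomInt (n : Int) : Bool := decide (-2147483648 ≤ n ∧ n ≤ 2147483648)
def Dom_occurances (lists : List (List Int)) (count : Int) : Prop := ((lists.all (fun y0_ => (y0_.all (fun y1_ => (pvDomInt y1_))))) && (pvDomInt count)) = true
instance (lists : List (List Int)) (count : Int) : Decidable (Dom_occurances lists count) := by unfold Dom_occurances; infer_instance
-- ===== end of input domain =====

-- B replaces A's dict-based counting by sort-then-scan over the flattened shifted indices (alternative algorithm, same results).

-- ===== PORT A =====
-- p[idx-offset] = p.get(idx-offset, 0) + 1 ; 'for idx in p' iterates keys in insertion order;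
-- p[idx] is ported as getD idx 0, exact because idx is always a present key.
def occurances (lists : List (List Int)) (count : Int) : Int :=
  let p : PySem.Dict Int Int :=
    (PySem.List.pyRange 0 (PySem.List.len lists) 1).foldl
      (fun d offset =>
        (PySem.List.pyGetD lists offset []).foldl
          (fun d idx => d.insert (idx - offset) (d.getD (idx - offset) 0 + 1)) d)
      PySem.Dict.empty
  let hits : Int := p.keys.foldl (fun h idx => if p.getD idx 0 = count then h + 1 else h) 0
  hits

-- ===== PORT B =====
-- Source B's inner 'while j < n and flat[j] == flat[i]' scans the maximal run of values equal to
-- flat[i]; runCount transcribes that run split structurally (takeWhile = the j-scan, the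
-- recursive call resumes at i = j), exact because the list is consumed left to right.
def runCount (count : Int) : List Int → Int
  | [] => 0
  | x :: rest =>
      (if ((1 + (rest.takeWhile (· == x)).length : Nat) : Int) = count then 1 else 0)
        + runCount count (rest.dropWhile (· == x))
termination_by l => l.length
decreasing_by
  exact Nat.lt_succ_of_le (List.length_dropWhile_le _ _)

def occurances_alt (lists : List (List Int)) (count : Int) : Int :=
  let flat := PySem.List.sorted
    ((PySem.List.enumerate lists 0).flatMap (fun q => q.2.map (fun idx => idx - q.1)))
    (fun v => v) false
  runCount count flat

-- ===== PRECONDITION & SPEC =====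
def Spec_occurances (lists : List (List Int)) (count : Int) (out : Int) : Prop := out = occurances_alt lists count
instance (lists : List (List Int)) (count : Int) (out : Int) : Decidable (Spec_occurances lists count out) := by unfold Spec_occurances; infer_instance

-- ===== CLAIM (what is proved, stated in full; the proofs are below) =====
def Claim_equal_occurances : Prop := ∀ (lists : List (List Int)) (count : Int), Dom_occurances lists count → Spec_occurances lists count (occurances lists count)

-- ===== LEMMAS AND PROOFS =====

-- the first element surviving dropWhile fails the predicate
theorem head_dropWhile_false (p : Int → Bool) (l : List Int) (y : Int) (t : List Int)
    (h : l.dropWhile p = y :: t) : p y = false := by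
  induction l with
  | nil => simp at h
  | cons a l ih =>
    rw [List.dropWhile_cons] at h
    split at h
    · exact ih h
    · rename_i hp; cases h; simpa using hp

-- folding Set.add over a list avoiding x keeps x in front
theorem foldl_add_cons_of_not_mem (l : List Int) (x : Int) (hx : x ∉ l) (s : List Int) :
    l.foldl PySem.Set.add (x :: s) = x :: l.foldl PySem.Set.add s := by
  induction l generalizing s with
  | nil => rfl
  | cons y t ih =>
    have hyx : y ≠ x := fun h => hx (h ▸ List.mem_cons_self)
    have hx' : x ∉ t := fun h => hx (List.mem_cons_of_mem _ h)
    simp only [List.foldl_cons]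
    rw [show PySem.Set.add (x :: s) y = x :: PySem.Set.add s y by
      simp only [PySem.Set.add, PySem.Set.contains]
      simp [hyx]
      split_ifs <;> rfl]
    exact ih hx' _

-- folding Set.add with elements already present changes nothing
theorem foldl_add_absorb (x : Int) (run : List Int) (hrun : ∀ y ∈ run, y = x)
    (s : List Int) (hs : x ∈ s) : run.foldl PySem.Set.add s = s := by
  induction run with
  | nil => rfl
  | cons y t ih =>
    have hy : y = x := hrun y List.mem_cons_self
    have habs : PySem.Set.add s y = s := by
      simp [PySem.Set.add, PySem.Set.contains, hy, hs]
    rw [List.foldl_cons, habs]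
    exact ih (fun z hz => hrun z (List.mem_cons_of_mem _ hz))

-- ofList of a run of x's followed by a tail avoiding x
theorem ofList_run_cons (x : Int) (run tail : List Int)
    (hrun : ∀ y ∈ run, y = x) (htail : x ∉ tail) :
    PySem.Set.ofList (x :: (run ++ tail)) = x :: PySem.Set.ofList tail := by
  rw [PySem.Set.ofList_eq_foldl, PySem.Set.ofList_eq_foldl]
  rw [List.foldl_cons, show PySem.Set.add [] x = [x] by rfl]
  rw [List.foldl_append, foldl_add_absorb x run hrun [x] List.mem_cons_self]
  exact foldl_add_cons_of_not_mem tail x htail []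

-- the central lemma: on a ≤-sorted list, counting runs of length `count` equals counting
-- distinct values whose multiplicity is `count`
theorem runCount_sorted_aux (n : Nat) (c : Int) (s : List Int) (hlen : s.length ≤ n)
    (hs : s.Pairwise (· ≤ ·)) :
    runCount c s = ((PySem.Set.ofList s).countP (fun k => decide ((s.count k : Int) = c)) : Int) := by
  induction n generalizing s with
  | zero =>
    have : s = [] := List.eq_nil_of_length_eq_zero (Nat.le_zero.mp hlen)
    subst this; simp [runCount, PySem.Set.ofList]
  | succ n ih =>
    match s with
    | [] => simp [runCount, PySem.Set.ofList]
    | x :: rest =>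
      set run := rest.takeWhile (· == x) with hrundef
      set tail := rest.dropWhile (· == x) with htaildef
      have hrt : run ++ tail = rest := List.takeWhile_append_dropWhile
      have hrun : ∀ y ∈ run, y = x := by
        intro y hy
        have := List.mem_takeWhile_imp hy
        exact eq_of_beq this
      -- x does not occur in tail
      have htail : x ∉ tail := by
        rw [htaildef]
        intro hx
        cases hdw : List.dropWhile (fun z => z == x) rest with
        | nil => rw [hdw] at hx; simp at hx
        | cons y t =>
          rw [hdw] at hx
          have hyx : y ≠ x := by
            simpa using head_dropWhile_false (fun z => z == x) rest y t hdw
          have hrt' : run ++ y :: t = rest := by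
            rw [hrundef, ← hdw]; exact List.takeWhile_append_dropWhile
          have hxle : ∀ z ∈ rest, x ≤ z := (List.pairwise_cons.mp hs).1
          have hsubt : (y :: t).Sublist rest := by
            rw [← hrt']; exact List.sublist_append_right _ _
          have hylet : ∀ z ∈ t, y ≤ z :=
            (List.pairwise_cons.mp (((List.pairwise_cons.mp hs).2).sublist hsubt)).1
          have hxy : x ≤ y := hxle y (hsubt.subset List.mem_cons_self)
          rcases List.mem_cons.mp hx with h | h
          · exact hyx h.symm
          · exact hyx (le_antisymm (hylet x h) hxy)
      have htailsorted : tail.Pairwise (· ≤ ·) := by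
        have : tail.Sublist rest := by rw [← hrt]; exact List.sublist_append_right _ _
        exact ((List.pairwise_cons.mp hs).2).sublist this
      have htaillen : tail.length ≤ n := by
        have h1 : tail.length ≤ rest.length := htaildef ▸ List.length_dropWhile_le _ _
        have h2 : rest.length + 1 ≤ n + 1 := by simpa using hlen
        omega
      -- counts
      have hcx : (x :: rest).count x = 1 + run.length := by
        rw [← hrt, List.count_cons_self, List.count_append]
        rw [List.count_eq_length.mpr (fun b hb => (hrun b hb).symm)]
        rw [List.count_eq_zero.mpr htail]
        omega
      have hck : ∀ k, k ≠ x → (x :: rest).count k = tail.count k := by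
        intro k hk
        have h1 : run.count k = 0 := List.count_eq_zero.mpr (fun h => hk (hrun k h))
        rw [← hrt]
        simp [List.count_append, h1, Ne.symm hk]
      -- sets
      have hset : PySem.Set.ofList (x :: rest) = x :: PySem.Set.ofList tail := by
        rw [← hrt]; exact ofList_run_cons x run tail hrun htail
      -- unfold one step of runCount
      have hcongr : (PySem.Set.ofList tail).countP (fun k => decide (((x :: rest).count k : Int) = c))
          = (PySem.Set.ofList tail).countP (fun k => decide ((tail.count k : Int) = c)) := by
        apply List.countP_congr
        intro k hk
        have hkmem : k ∈ tail := (PySem.List.mem_dedup tail k).mp hk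
        have hkx : k ≠ x := fun h => htail (h ▸ hkmem)
        rw [hck k hkx]
      have hpx : (decide (((x :: rest).count x : Int) = c)) = decide (((1 + run.length : Nat) : Int) = c) := by
        rw [hcx]
      rw [runCount]
      simp only [← hrundef, ← htaildef]
      rw [ih tail htaillen htailsorted, hset, List.countP_cons, hcongr, hpx]
      simp only [decide_eq_true_eq]
      push_cast
      split_ifs <;> omega

theorem runCount_sorted (c : Int) (s : List Int) (hs : s.Pairwise (· ≤ ·)) :
    runCount c s = ((PySem.Set.ofList s).countP (fun k => decide ((s.count k : Int) = c)) : Int) :=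
  runCount_sorted_aux s.length c s le_rfl hs

-- ===== VERDICT (by name: the statement is the Claim_ definition above) =====
theorem occurances_spec : Claim_equal_occurances := by
  intro lists count _
  unfold Spec_occurances occurances occurances_alt
  set F := (PySem.List.enumerate lists 0).flatMap (fun q => q.2.map (fun idx => idx - q.1)) with hF
  -- A's dict-building loop is the counting loop over the flattened shifted indices F
  have hdict : (PySem.List.pyRange 0 (PySem.List.len lists) 1).foldl
      (fun d offset =>
        (PySem.List.pyGetD lists offset []).foldl
          (fun d idx => d.insert (idx - offset) (d.getD (idx - offset) 0 + 1)) d)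
      (PySem.Dict.empty : PySem.Dict Int Int)
      = F.foldl (fun d v => d.insert v (d.getD v 0 + 1)) PySem.Dict.empty := by
    rw [hF, List.foldl_flatMap]
    simp only [List.foldl_map]
    rw [PySem.List.enumerate_eq_map_pyRange (xs := lists) (d := ([] : List Int))]
    simp only [List.foldl_map]
  have hkeys : (F.foldl (fun d v => d.insert v (d.getD v 0 + 1)) (PySem.Dict.empty : PySem.Dict Int Int)).keys
      = PySem.Set.ofList F := by
    rw [PySem.Dict.keys_foldl_insert]
    rfl
  have hgetD : ∀ v, (F.foldl (fun d v => d.insert v (d.getD v 0 + 1)) (PySem.Dict.empty : PySem.Dict Int Int)).getD v 0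
      = (F.count v : Int) := by
    intro v
    rw [PySem.Dict.getD_foldl_insert_add_one]
    simp
  -- B's run scan over the sorted flattened list counts the same distinct values
  have hpair : (PySem.List.sorted F (fun v => v) false).Pairwise (· ≤ ·) := by
    simpa using PySem.List.sorted_pairwise (xs := F) (key := fun v => v)
  have hperm : (PySem.List.sorted F (fun v => v) false).Perm F := PySem.List.sorted_perm F (fun v => v) false
  have hsp : (PySem.Set.ofList (PySem.List.sorted F (fun v => v) false)).Perm (PySem.Set.ofList F) := by
    apply (List.perm_ext_iff_of_nodup ?_ ?_).mpr
    · intro a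
      constructor <;> intro h
      · exact (PySem.List.mem_dedup _ _).mpr (hperm.mem_iff.mp ((PySem.List.mem_dedup _ _).mp h))
      · exact (PySem.List.mem_dedup _ _).mpr (hperm.mem_iff.mpr ((PySem.List.mem_dedup _ _).mp h))
    · exact PySem.List.nodup_dedup _
    · exact PySem.List.nodup_dedup _
  have hB : runCount count (PySem.List.sorted F (fun v => v) false)
      = ((PySem.Set.ofList F).countP (fun k => decide ((F.count k : Int) = count)) : Int) := by
    rw [runCount_sorted count _ hpair]
    have hc : ∀ k, (PySem.List.sorted F (fun v => v) false).count k = F.count k :=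
      fun k => hperm.count_eq k
    simp only [hc]
    rw [hsp.countP_eq]
  simp only [hdict, hB]
  rw [PySem.List.foldl_ite_add_one]
  simp only [hgetD, zero_add]
  rw [hkeys]
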